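-- pv_equiv track=rewrite | github.com/JimYin88/ProjectEuler | Problem051.py | number_variation
-- ===== SOURCE A (Python) =====
-- def number_variation(n, position):
--     result = []
--     number_string = str(n)
--     for number_replacement in range(10):
--         number = ''
--         for idx, digit in enumerate(number_string):
--             if idx in position:
--                 number += str(number_replacement)
--             else:
--                 number += str(digit)
--
--         result.append(int(number))
--
--     return result
-- ===== SOURCE B (Python) =====
-- def number_variation(n, position):
--     chars = list(str(n))
--     length = len(chars)
--     result = []
--     for r in range(10):
--         cs = chars.copy()
--         d = str(r)
--         for p in position:
--             if 0 <= p < length: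
--                 cs[p] = d
--         result.append(int(''.join(cs)))
--     return result
-- ===== Notes on version B (the rewrite author's own statement) =====
-- stated objective: alternative
-- what changed: Instead of scanning every character of str(n) and testing its index for membership in position, B copies the digit list once per replacement digit and directly assigns the replacement at each in-range position, eliminating the per-character membership test.
import Mathlib
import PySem

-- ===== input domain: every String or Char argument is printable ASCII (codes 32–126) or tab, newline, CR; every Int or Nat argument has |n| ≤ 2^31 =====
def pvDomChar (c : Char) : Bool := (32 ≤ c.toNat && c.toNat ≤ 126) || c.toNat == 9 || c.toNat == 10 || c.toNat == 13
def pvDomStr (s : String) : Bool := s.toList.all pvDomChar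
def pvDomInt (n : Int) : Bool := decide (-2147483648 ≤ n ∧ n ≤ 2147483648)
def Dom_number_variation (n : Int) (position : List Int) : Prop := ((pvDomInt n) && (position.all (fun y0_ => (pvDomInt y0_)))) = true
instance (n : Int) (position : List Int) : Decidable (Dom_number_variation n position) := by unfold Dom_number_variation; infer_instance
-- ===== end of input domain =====

-- B replaces A's per-character membership scan by one positional assignment pass per replacement digit (alternative decomposition).


-- ===== PORT A =====
def number_variation (n : Int) (position : List Int) : List Int :=
  let number_string := PySem.Int.toChars n
  (PySem.List.pyRange 0 10 1).foldl
    (fun result number_replacement =>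
      let number := (PySem.List.enumerate number_string).foldl
        (fun number q =>
          if q.1 ∈ position then number ++ PySem.Int.toChars number_replacement
          else number ++ [q.2]) ([] : List Char)
      -- int(number): never a ValueError here (number is an optional '-' followed by digits)
      result ++ [(PySem.Int.ofChars? number).getD 0])
    []

-- ===== PORT B =====
def number_variation_alt (n : Int) (position : List Int) : List Int :=
  let chars := PySem.Int.toChars n
  let length : Int := chars.length
  (PySem.List.pyRange 0 10 1).foldl
    (fun result r =>
      -- d := str(r), a single character since 0 ≤ r < 10
      let d := (PySem.Int.toChars r).headD '0'
      let cs := position.foldl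
        (fun cs p => if 0 ≤ p ∧ p < length then cs.set p.toNat d else cs) chars
      result ++ [(PySem.Int.ofChars? cs).getD 0])
    []

-- ===== PRECONDITION & SPEC =====
def Spec_number_variation (n : Int) (position : List Int) (out : List Int) : Prop := out = number_variation_alt n position
instance (n : Int) (position : List Int) (out : List Int) : Decidable (Spec_number_variation n position out) := by unfold Spec_number_variation; infer_instance

-- ===== CLAIM (what is proved, stated in full; the proofs are below) =====
def Claim_equal_number_variation : Prop := ∀ (n : Int) (position : List Int), Dom_number_variation n position → Spec_number_variation n position (number_variation n position)

-- ===== LEMMAS AND PROOFS =====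

-- A's inner loop: appending one element per pair is a map over the pairs.
lemma foldl_if_append_map {α : Type} (P : Int × α → Prop) [DecidablePred P] (d : α) :
    ∀ (l : List (Int × α)) (acc : List α),
      l.foldl (fun acc q => if P q then acc ++ [d] else acc ++ [q.2]) acc
        = acc ++ l.map (fun q => if P q then d else q.2) := by
  intro l
  induction l with
  | nil => intro acc; simp
  | cons q l ih =>
      intro acc
      simp only [List.foldl_cons, List.map_cons]
      by_cases h : P q <;> simp [h, ih]

-- B's inner loop preserves the length of the character list
lemma foldl_set_len (d : Char) (L : Int) :
    ∀ (ps : List Int) (cs : List Char),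
      (ps.foldl (fun cs p => if 0 ≤ p ∧ p < L then cs.set p.toNat d else cs) cs).length = cs.length := by
  intro ps
  induction ps with
  | nil => intro cs; simp
  | cons p ps ih =>
      intro cs
      simp only [List.foldl_cons]
      by_cases hp : 0 ≤ p ∧ p < L
      · simp [hp, ih]
      · simp [hp, ih]

-- B's inner loop: an element is replaced exactly when its index belongs to the fold's list
lemma foldl_set_get (d : Char) (L : Int) :
    ∀ (ps : List Int) (cs : List Char), (cs.length : Int) = L →
      ∀ (i : Nat) (hi : i < cs.length),
        (ps.foldl (fun cs p => if 0 ≤ p ∧ p < L then cs.set p.toNat d else cs) cs)[i]'(by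
            rw [foldl_set_len]; exact hi) =
          if (i : Int) ∈ ps then d else cs[i] := by
  intro ps
  induction ps with
  | nil => intro cs hL i hi; simp
  | cons p ps ih =>
      intro cs hL i hi
      simp only [List.foldl_cons]
      by_cases hp : 0 ≤ p ∧ p < L
      · simp only [if_pos hp]
        have hlen : ((cs.set p.toNat d).length : Int) = L := by simpa using hL
        have hi2 : i < (cs.set p.toNat d).length := by simpa using hi
        rw [ih (cs.set p.toNat d) hlen i hi2]
        have hset : (cs.set p.toNat d)[i]'hi2 = if (i : Int) = p then d else cs[i]'hi := by
          rw [List.getElem_set]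
          by_cases hip : (i : Int) = p
          · have h1 : p.toNat = i := by omega
            simp [h1, hip]
          · have h1 : p.toNat ≠ i := by omega
            simp [h1, hip]
        by_cases hm : (i : Int) ∈ ps
        · simp [hm, List.mem_cons]
        · rw [if_neg hm, hset]
          by_cases hip : (i : Int) = p
          · simp [hip, List.mem_cons]
          · have hni : ¬ ((i : Int) ∈ p :: ps) := by simp [List.mem_cons, hip, hm]
            simp [hni, hip]
      · simp only [if_neg hp]
        rw [ih cs hL i hi]
        have hip : ¬ ((i : Int) = p) := by intro h; exact hp (by constructor <;> omega)
        by_cases hm : (i : Int) ∈ ps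
        · simp [hm, List.mem_cons]
        · have hni : ¬ ((i : Int) ∈ p :: ps) := by simp [List.mem_cons, hip, hm]
          simp [hni, hm]

-- for a fixed replacement character, both inner loops build the same character list
lemma inner_eq (position : List Int) (cs : List Char) (d : Char) :
    (PySem.List.enumerate cs).foldl
        (fun acc q => if q.1 ∈ position then acc ++ [d] else acc ++ [q.2]) ([] : List Char)
      = position.foldl
          (fun l p => if 0 ≤ p ∧ p < (cs.length : Int) then l.set p.toNat d else l) cs := by
  rw [foldl_if_append_map (fun q => q.1 ∈ position) d]
  apply List.ext_getElem
  · simp [foldl_set_len, PySem.List.length_enumerate]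
  · intro i h1 h2
    have hi : i < cs.length := by simpa [PySem.List.length_enumerate] using h1
    rw [foldl_set_get d (cs.length : Int) position cs rfl i hi]
    simp [PySem.List.getElem_enumerate]

theorem number_variation_eq_alt (n : Int) (position : List Int) :
    number_variation n position = number_variation_alt n position := by
  unfold number_variation number_variation_alt
  apply PySem.List.foldl_congr_mem
  intro acc r hr
  obtain ⟨h0, h1⟩ := PySem.List.mem_pyRange_one.1 hr
  obtain ⟨d, hd⟩ : ∃ d, PySem.Int.toChars r = [d] := by
    interval_cases r <;> exact ⟨_, rfl⟩
  simp only [hd, List.headD_cons]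
  rw [inner_eq position (PySem.Int.toChars n) d]

-- ===== VERDICT (by name: the statement is the Claim_ definition above) =====
theorem number_variation_spec : Claim_equal_number_variation := by
  intro n position _
  unfold Spec_number_variation
  exact number_variation_eq_alt n position
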